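-- pv_equiv track=rewrite | github.com/miliar/Code_Jam_Webscraper | Solutions_python/Problem_200/3873.py | opti
-- ===== SOURCE A (Python) =====
-- def opti (num):
--
--     string = str(num)
--     stack = 0
--     for index in range(len(string)- 1):
--         if string[index] > string[index + 1]:
--             if stack != 0:
--                 return [string[:stack_index], string[stack_index:]]
--
--             return [string[:index], string[index:]]
--
--         elif string[index] == string[index + 1]:
--             stack += 1
--             if stack == 1:
--                 stack_index = index
--         else:
--             fine_index = index
--
--     return [string[:]]
-- ===== SOURCE B (Python) =====
-- def opti(num):
--     s = str(num)
--     pairs = range(len(s) - 1)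
--     d = next((i for i in pairs if s[i] > s[i + 1]), None)
--     if d is None:
--         return [s]
--     e = next((i for i in pairs if s[i] == s[i + 1]), None)
--     split = e if (e is not None and e < d) else d
--     return [s[:split], s[split:]]
-- ===== Notes on version B (the rewrite author's own statement) =====
-- stated objective: simpler
-- what changed: Replaces the interleaved stack/stack_index state machine (with its dead fine_index and stack counter) by two independent first-match searches for the first descent and the first equal pair, followed by a closed-form choice of the split index.
import Mathlib
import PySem

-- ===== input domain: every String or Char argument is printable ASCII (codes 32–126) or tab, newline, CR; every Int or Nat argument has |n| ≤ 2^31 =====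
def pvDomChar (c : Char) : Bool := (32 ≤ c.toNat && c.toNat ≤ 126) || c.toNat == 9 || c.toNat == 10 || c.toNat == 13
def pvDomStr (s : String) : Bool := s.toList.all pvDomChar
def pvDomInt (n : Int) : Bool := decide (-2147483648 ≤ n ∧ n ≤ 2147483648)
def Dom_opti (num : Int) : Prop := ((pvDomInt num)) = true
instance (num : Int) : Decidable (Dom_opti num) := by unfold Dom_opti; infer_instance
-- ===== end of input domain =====

-- B replaces A's interleaved stack/stack_index state machine by two independent
-- first-match searches (first descent, first equal pair) plus a closed-form choice
-- of the split index; objective: simpler.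

-- ===== PORT A =====
-- A's 'for index in range(len(string)-1)' walks adjacent pairs s[index], s[index+1];
-- ported as structural recursion over the remaining characters with the running index.
-- stack_index is unbound in Python until the first equal pair; it is only read when
-- stack ≠ 0, so the initial 0 is never observed.
def optiGo (s : List Char) (i : Nat) (rest : List Char) (stack : Int) (stackIndex : Nat) : List String :=
  match rest with
  | c1 :: c2 :: rs =>
    if c2 < c1 then                       -- string[index] > string[index+1]
      if stack ≠ 0 then
        [String.mk (s.take stackIndex), String.mk (s.drop stackIndex)]
      else
        [String.mk (s.take i), String.mk (s.drop i)]
    else if c1 = c2 then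
      optiGo s (i + 1) (c2 :: rs) (stack + 1) (if stack + 1 = 1 then i else stackIndex)
    else
      optiGo s (i + 1) (c2 :: rs) stack stackIndex   -- fine_index = index (dead)
  | _ => [String.mk s]                    -- return [string[:]]

def opti (num : Int) : List String :=
  let s := (PySem.Int.toStr num).toList
  optiGo s 0 s 0 0

-- ===== PORT B =====
-- first index i (counting from the given offset) with p s[i] s[i+1]
def findPair (p : Char → Char → Bool) (rest : List Char) (i : Nat) : Option Nat :=
  match rest with
  | c1 :: c2 :: rs => if p c1 c2 then some i else findPair p (c2 :: rs) (i + 1)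
  | _ => none

def opti_alt (num : Int) : List String :=
  let s := (PySem.Int.toStr num).toList
  match findPair (fun a b => decide (b < a)) s 0 with
  | none => [String.mk s]
  | some d =>
    let split :=
      match findPair (fun a b => a == b) s 0 with
      | some e => if e < d then e else d
      | none => d
    [String.mk (s.take split), String.mk (s.drop split)]

-- ===== PRECONDITION & SPEC =====
def Spec_opti (num : Int) (out : List String) : Prop := out = opti_alt num
instance (num : Int) (out : List String) : Decidable (Spec_opti num out) := by unfold Spec_opti; infer_instance

-- ===== CLAIM (what is proved, stated in full; the proofs are below) =====
def Claim_equal_opti : Prop := ∀ (num : Int), Dom_opti num → Spec_opti num (opti num)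

-- ===== LEMMAS AND PROOFS =====

lemma findPair_ge (p : Char → Char → Bool) :
    ∀ (rest : List Char) (i k : Nat), findPair p rest i = some k → i ≤ k := by
  intro rest
  induction rest with
  | nil => intro i k h; simp [findPair] at h
  | cons c1 tl ih =>
    intro i k h
    cases tl with
    | nil => simp [findPair] at h
    | cons c2 rs =>
      simp only [findPair] at h
      split_ifs at h with hp
      · have := Option.some.inj h
        omega
      · have := ih (i + 1) k h
        omega

-- A's loop after the first equal pair: stack ≥ 1, stackIndex frozen; the result
-- splits at stackIndex at the first descent, else returns the whole string.
lemma optiGo_pos (s : List Char) :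
    ∀ (rest : List Char) (i : Nat) (stack : Int) (si : Nat), 1 ≤ stack →
      optiGo s i rest stack si =
        match findPair (fun a b => decide (b < a)) rest i with
        | none => [String.mk s]
        | some _ => [String.mk (s.take si), String.mk (s.drop si)] := by
  intro rest
  induction rest with
  | nil => intro i stack si h; simp [optiGo, findPair]
  | cons c1 tl ih =>
    intro i stack si h
    cases tl with
    | nil => simp [optiGo, findPair]
    | cons c2 rs =>
      by_cases hlt : c2 < c1
      · simp [optiGo, findPair, hlt, show stack ≠ 0 by omega]
      · by_cases heq : c1 = c2
        · rw [show optiGo s i (c1 :: c2 :: rs) stack si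
                = optiGo s (i + 1) (c2 :: rs) (stack + 1) si by
              simp [optiGo, hlt, heq, show stack + 1 ≠ 1 by omega]]
          rw [ih (i + 1) (stack + 1) si (by omega)]
          simp [findPair, hlt]
        · rw [show optiGo s i (c1 :: c2 :: rs) stack si
                = optiGo s (i + 1) (c2 :: rs) stack si by
              simp [optiGo, hlt, heq]]
          rw [ih (i + 1) stack si h]
          simp [findPair, hlt]

-- A's loop before any equal pair (stack = 0) equals B's two-searches formulation.
lemma optiGo_zero (s : List Char) :
    ∀ (rest : List Char) (i : Nat) (si : Nat),
      optiGo s i rest 0 si =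
        match findPair (fun a b => decide (b < a)) rest i with
        | none => [String.mk s]
        | some d =>
          match findPair (fun a b => a == b) rest i with
          | some e =>
            if e < d then [String.mk (s.take e), String.mk (s.drop e)]
            else [String.mk (s.take d), String.mk (s.drop d)]
          | none => [String.mk (s.take d), String.mk (s.drop d)] := by
  intro rest
  induction rest with
  | nil => intro i si; simp [optiGo, findPair]
  | cons c1 tl ih =>
    intro i si
    cases tl with
    | nil => simp [optiGo, findPair]
    | cons c2 rs =>
      by_cases hlt : c2 < c1
      · have hne : (c1 == c2) = false := by
          simp only [beq_eq_false_iff_ne, ne_eq]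
          intro hc; rw [hc] at hlt; exact absurd hlt (lt_irrefl _)
        cases hfe : findPair (fun a b => a == b) (c2 :: rs) (i + 1) with
        | none => simp [optiGo, findPair, hlt, hne, hfe]
        | some e =>
          have he := findPair_ge _ _ _ _ hfe
          simp [optiGo, findPair, hlt, hne, hfe, show ¬ e < i by omega]
      · by_cases heq : c1 = c2
        · subst heq
          rw [show optiGo s i (c1 :: c1 :: rs) 0 si
                = optiGo s (i + 1) (c1 :: rs) 1 i by simp [optiGo]]
          rw [optiGo_pos s (c1 :: rs) (i + 1) 1 i le_rfl]
          cases hfd : findPair (fun a b => decide (b < a)) (c1 :: rs) (i + 1) with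
          | none => simp [findPair, hfd]
          | some d =>
            have hd := findPair_ge _ _ _ _ hfd
            simp [findPair, hfd, show i < d by omega]
        · have hne : (c1 == c2) = false := by simpa using heq
          rw [show optiGo s i (c1 :: c2 :: rs) 0 si
                = optiGo s (i + 1) (c2 :: rs) 0 si by simp [optiGo, hlt, heq]]
          rw [ih (i + 1) si]
          simp [findPair, hlt, hne]

-- ===== VERDICT (by name: the statement is the Claim_ definition above) =====
theorem opti_spec : Claim_equal_opti := by
  intro num _
  unfold Spec_opti
  simp only [opti, opti_alt, optiGo_zero]
  cases findPair (fun a b => decide (b < a)) (PySem.Int.toStr num).toList 0 with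
  | none => rfl
  | some d =>
    cases findPair (fun a b => a == b) (PySem.Int.toStr num).toList 0 with
    | none => rfl
    | some e => by_cases he : e < d <;> simp [he]
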